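-- pv_equiv track=rewrite | github.com/incalescence/LeetCode | quarellingFrogs/solution.py | solution
-- ===== SOURCE A (Python) =====
-- def solution(blocks):
--     max_difference = 0
--     for i in range(len(blocks)):
--         # move one frog to the most left position possible and move the other frog to the most right position posible
--         left = i
--         while left > 0 and blocks[left - 1] >= blocks[left]:
--             left -= 1
--         right = i
--         while right < len(blocks) -1 and blocks[right + 1] >= blocks[right]:
--             right += 1
--         max_difference = max(max_difference, right - left + 1)
--     return max_difference
-- ===== SOURCE B (Python) =====
-- def solution(blocks):
--     n = len(blocks)
--     rights = [0] * n
--     for i in range(n - 1, -1, -1):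
--         if i + 1 < n and blocks[i + 1] >= blocks[i]:
--             rights[i] = rights[i + 1]
--         else:
--             rights[i] = i
--     best = 0
--     left = 0
--     for i in range(n):
--         if not (i > 0 and blocks[i - 1] >= blocks[i]):
--             left = i
--         best = max(best, rights[i] - left + 1)
--     return best
-- ===== Notes on version B (the rewrite author's own statement) =====
-- stated objective: faster
-- what changed: Replaced the per-index inner while-loop scans with an O(n) DP: a backward pass precomputes each index's right reach (rights[i] = rights[i+1] when non-decreasing), and a forward pass maintains the running left reach, so no index is rescanned.
import Mathlib
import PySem

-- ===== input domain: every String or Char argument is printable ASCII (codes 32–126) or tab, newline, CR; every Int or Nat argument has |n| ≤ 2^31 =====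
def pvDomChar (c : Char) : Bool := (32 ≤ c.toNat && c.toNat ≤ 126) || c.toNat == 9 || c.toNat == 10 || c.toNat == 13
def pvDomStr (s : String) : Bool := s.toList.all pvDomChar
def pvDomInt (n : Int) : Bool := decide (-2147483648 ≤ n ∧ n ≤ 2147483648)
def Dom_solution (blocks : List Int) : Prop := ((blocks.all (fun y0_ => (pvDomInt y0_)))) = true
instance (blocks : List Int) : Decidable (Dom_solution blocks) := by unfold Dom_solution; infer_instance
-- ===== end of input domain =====

-- B replaces A's per-index inner while-loops by a linear backward right-reach pass
-- plus a forward running left-reach variable (faster: asymptotic, O(n^2) → O(n)).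

-- ===== PORT A =====
-- A's inner `while left > 0 and blocks[left-1] >= blocks[left]: left -= 1`
def goLeft (blocks : List Int) : Nat → Nat
  | 0 => 0
  | l + 1 => if blocks.getD l 0 ≥ blocks.getD (l + 1) 0 then goLeft blocks l else l + 1

-- A's inner `while right < len(blocks)-1 and blocks[right+1] >= blocks[right]: right += 1`;
-- the fuel is len(blocks)-1-right, so fuel > 0 ↔ right < len(blocks)-1.
def goRight (blocks : List Int) : Nat → Nat → Nat
  | 0, r => r
  | f + 1, r => if blocks.getD (r + 1) 0 ≥ blocks.getD r 0 then goRight blocks f (r + 1) else r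

def solution (blocks : List Int) : Int :=
  (List.range blocks.length).foldl
    (fun m i =>
      let left := goLeft blocks i
      let right := goRight blocks (blocks.length - 1 - i) i
      max m ((right : Int) - (left : Int) + 1))
    0

-- ===== PORT B =====
-- backward pass: builds the list `rights` (rights[i] = rights[i+1] if blocks[i+1] >= blocks[i] else i),
-- consing each value onto the already-built suffix; first argument counts the indices still to fill.
def rightsAux (blocks : List Int) : Nat → List Nat → List Nat
  | 0, acc => acc
  | i + 1, acc =>
      rightsAux blocks i
        ((if i + 1 < blocks.length ∧ blocks.getD (i + 1) 0 ≥ blocks.getD i 0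
          then acc.headD i else i) :: acc)

def solution_alt (blocks : List Int) : Int :=
  let n := blocks.length
  let rights := rightsAux blocks n []
  let res := (List.range n).foldl
    (fun (s : Nat × Int) i =>
      let left := if 0 < i ∧ blocks.getD (i - 1) 0 ≥ blocks.getD i 0 then s.1 else i
      (left, max s.2 ((rights.getD i 0 : Int) - (left : Int) + 1)))
    (0, 0)
  res.2

-- ===== PRECONDITION & SPEC =====
def Spec_solution (blocks : List Int) (out : Int) : Prop := out = solution_alt blocks
instance (blocks : List Int) (out : Int) : Decidable (Spec_solution blocks out) := by unfold Spec_solution; infer_instance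

-- ===== CLAIM (what is proved, stated in full; the proofs are below) =====
def Claim_equal_solution : Prop := ∀ (blocks : List Int), Dom_solution blocks → Spec_solution blocks (solution blocks)

-- ===== LEMMAS AND PROOFS =====

-- A's right scan from i, written with fuel n-1-i, satisfies the DP recurrence of B.
lemma goRight_rec (blocks : List Int) (i : Nat) (hi : i < blocks.length) :
    goRight blocks (blocks.length - 1 - i) i =
      if i + 1 < blocks.length ∧ blocks.getD (i + 1) 0 ≥ blocks.getD i 0
      then goRight blocks (blocks.length - 1 - (i + 1)) (i + 1) else i := by
  by_cases h : i + 1 < blocks.length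
  · have hf : blocks.length - 1 - i = (blocks.length - 1 - (i + 1)) + 1 := by omega
    rw [hf]
    simp only [goRight]
    by_cases hc : blocks.getD (i + 1) 0 ≥ blocks.getD i 0
    · rw [if_pos hc, if_pos ⟨h, hc⟩]
    · rw [if_neg hc, if_neg (fun hh => hc hh.2)]
  · have hf : blocks.length - 1 - i = 0 := by omega
    rw [hf, goRight, if_neg (fun hh => h hh.1)]

-- the list built by rightsAux is the pointwise table of A's right scans
lemma rightsAux_eq (blocks : List Int) :
    ∀ m, m ≤ blocks.length →
      rightsAux blocks m
          ((List.range' m (blocks.length - m)).map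
            (fun i => goRight blocks (blocks.length - 1 - i) i)) =
        (List.range' 0 blocks.length).map
          (fun i => goRight blocks (blocks.length - 1 - i) i) := by
  intro m
  induction m with
  | zero => intro _; simp [rightsAux]
  | succ i ih =>
      intro hm
      have hi : i < blocks.length := by omega
      rw [rightsAux]
      have hval :
          (if i + 1 < blocks.length ∧ blocks.getD (i + 1) 0 ≥ blocks.getD i 0
            then ((List.range' (i + 1) (blocks.length - (i + 1))).map
              (fun j => goRight blocks (blocks.length - 1 - j) j)).headD i
            else i) = goRight blocks (blocks.length - 1 - i) i := by
        rw [goRight_rec blocks i hi]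
        by_cases h : i + 1 < blocks.length ∧ blocks.getD (i + 1) 0 ≥ blocks.getD i 0
        · rw [if_pos h, if_pos h]
          have hne : blocks.length - (i + 1) = (blocks.length - (i + 1) - 1) + 1 := by omega
          rw [hne, List.range'_succ]
          simp
        · rw [if_neg h, if_neg h]
      rw [hval]
      have hcons :
          goRight blocks (blocks.length - 1 - i) i ::
              (List.range' (i + 1) (blocks.length - (i + 1))).map
                (fun j => goRight blocks (blocks.length - 1 - j) j) =
            (List.range' i (blocks.length - i)).map
              (fun j => goRight blocks (blocks.length - 1 - j) j) := by
        have h1 : blocks.length - i = (blocks.length - (i + 1)) + 1 := by omega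
        rw [h1, List.range'_succ]
        simp
      rw [hcons]
      exact ih (by omega)

lemma rights_getD (blocks : List Int) (k : Nat) (hk : k < blocks.length) :
    (rightsAux blocks blocks.length []).getD k 0 =
      goRight blocks (blocks.length - 1 - k) k := by
  have h := rightsAux_eq blocks blocks.length le_rfl
  simp only [Nat.sub_self, List.range'_zero, List.map_nil] at h
  rw [h, List.getD_eq_getElem?_getD]
  simp [hk]

-- main fold invariant: snd tracks A's running max, fst tracks goLeft of the last index
lemma fold_inv (blocks : List Int) :
    ∀ k, k ≤ blocks.length →
      (((List.range k).foldl
          (fun (s : Nat × Int) i =>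
            let left := if 0 < i ∧ blocks.getD (i - 1) 0 ≥ blocks.getD i 0 then s.1 else i
            (left, max s.2 (((rightsAux blocks blocks.length []).getD i 0 : Int) - (left : Int) + 1)))
          (0, 0)).1 = goLeft blocks (k - 1)) ∧
      (((List.range k).foldl
          (fun (s : Nat × Int) i =>
            let left := if 0 < i ∧ blocks.getD (i - 1) 0 ≥ blocks.getD i 0 then s.1 else i
            (left, max s.2 (((rightsAux blocks blocks.length []).getD i 0 : Int) - (left : Int) + 1)))
          (0, 0)).2 =
        (List.range k).foldl
          (fun m i =>
            let left := goLeft blocks i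
            let right := goRight blocks (blocks.length - 1 - i) i
            max m ((right : Int) - (left : Int) + 1)) 0) := by
  intro k
  induction k with
  | zero => intro _; constructor <;> simp [goLeft]
  | succ k ih =>
      intro hk
      obtain ⟨ih1, ih2⟩ := ih (by omega)
      have hkl : k < blocks.length := by omega
      rw [List.range_succ, List.foldl_append, List.foldl_append]
      simp only [List.foldl_cons, List.foldl_nil]
      have hleft :
          (if 0 < k ∧ blocks.getD (k - 1) 0 ≥ blocks.getD k 0
            then (((List.range k).foldl
              (fun (s : Nat × Int) i =>
                let left := if 0 < i ∧ blocks.getD (i - 1) 0 ≥ blocks.getD i 0 then s.1 else i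
                (left, max s.2 (((rightsAux blocks blocks.length []).getD i 0 : Int) - (left : Int) + 1)))
              (0, 0)).1)
            else k) = goLeft blocks k := by
        by_cases h : 0 < k ∧ blocks.getD (k - 1) 0 ≥ blocks.getD k 0
        · rw [if_pos h, ih1]
          obtain ⟨h0, hc⟩ := h
          obtain ⟨k', rfl⟩ : ∃ k', k = k' + 1 := ⟨k - 1, by omega⟩
          simp only [goLeft]
          rw [if_pos (by simpa using hc)]
          simp
        · rw [if_neg h]
          rcases Nat.eq_zero_or_pos k with h0 | h0
          · subst h0; simp [goLeft]
          · obtain ⟨k', rfl⟩ : ∃ k', k = k' + 1 := ⟨k - 1, by omega⟩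
            have hc : ¬ blocks.getD k' 0 ≥ blocks.getD (k' + 1) 0 := by
              intro hge; exact h ⟨h0, by simpa using hge⟩
            exact (by simp only [goLeft]; rw [if_neg hc] :
              goLeft blocks (k' + 1) = k' + 1).symm
      constructor
      · rw [hleft]; simp
      · rw [hleft, ih2, rights_getD blocks k hkl]

-- ===== VERDICT (by name: the statement is the Claim_ definition above) =====
theorem solution_spec : Claim_equal_solution := by
  intro blocks _
  unfold Spec_solution solution solution_alt
  have h := (fold_inv blocks blocks.length le_rfl).2
  simpa using h.symm
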